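-- pv_equiv track=rewrite | github.com/ivan17lai/jpgCompression-work | mainv2.py | acDe
-- ===== SOURCE A (Python) =====
-- def from_lcomp(n):
--     n = str(n)
--     if n == "":
--         return 0
--     else:
--         if n[0] == "1":
--             return int(n,2)
--         else:
--             return int(int(n,2) ^ int("1"*len(n),2))*-1
--
-- def acDe(acHT, ac_code):
--     result = []
--     i = 0
--     while i < len(ac_code):
--         found = False
--         for j in range(1, 17):
--             prefix = ac_code[i:i + j]
--             if prefix in acHT:
--                 val = acHT[prefix]
--                 r = val >> 4
--                 a = val & 0xF
--                 lcomp_bits = ac_code[i + j:i + j + a]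
--                 result.append((r, from_lcomp(lcomp_bits)))
--                 i += j + a
--                 found = True
--                 break
--     return result
-- ===== SOURCE B (Python) =====
-- def from_lcomp(n):
--     n = str(n)
--     if n == "":
--         return 0
--     else:
--         if n[0] == "1":
--             return int(n,2)
--         else:
--             return int(int(n,2) ^ int("1"*len(n),2))*-1
--
-- def acDe(acHT, ac_code):
--     # Build a prefix trie once from the table's codes,
--     # then decode by descending the trie; first value node = shortest matching prefix.
--     root = {}
--     for code in acHT:
--         if code:
--             node = root
--             for c in code:
--                 node = node.setdefault(c, {})
--             node.setdefault(None, acHT[code])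
--     result = []
--     i, n = 0, len(ac_code)
--     while i < n:
--         node, j, val = root, 0, None
--         while val is None and j < 16 and i + j < n:
--             node = node.get(ac_code[i + j])
--             if node is None:
--                 break
--             j += 1
--             val = node.get(None)
--         if val is None:
--             # no code matches here: the table/bitstring is invalid; stop decoding
--             return result
--         r, a = val >> 4, val & 0xF
--         result.append((r, from_lcomp(ac_code[i + j:i + j + a])))
--         i += j + a
--     return result
-- ===== Notes on version B (the rewrite author's own statement) =====
-- stated objective: alternative
-- what changed: B builds a prefix trie from the table's codes once and decodes by descending it one character at a time (first value node = shortest match), instead of A's per-position loop that re-slices the string for every candidate length 1..16 and does a dict lookup per slice.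
import Mathlib
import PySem

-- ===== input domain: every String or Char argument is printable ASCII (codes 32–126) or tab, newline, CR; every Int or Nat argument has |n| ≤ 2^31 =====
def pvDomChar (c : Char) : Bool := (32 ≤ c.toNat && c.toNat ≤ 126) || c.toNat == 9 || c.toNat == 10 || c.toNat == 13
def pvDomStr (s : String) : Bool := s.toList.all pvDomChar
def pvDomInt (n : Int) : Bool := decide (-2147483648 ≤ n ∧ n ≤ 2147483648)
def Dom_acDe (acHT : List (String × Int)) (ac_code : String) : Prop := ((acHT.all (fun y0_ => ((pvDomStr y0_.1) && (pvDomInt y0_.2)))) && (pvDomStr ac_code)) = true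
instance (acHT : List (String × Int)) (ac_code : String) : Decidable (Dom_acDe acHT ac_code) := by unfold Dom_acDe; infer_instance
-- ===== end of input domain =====

-- B decodes via a binary prefix trie built once from the table instead of A's per-position
-- slice-and-lookup scan over candidate lengths 1..16 (objective: alternative algorithm, same cost class).


-- ===== PORT A =====
-- from_lcomp: int(n,2) is PySem.Int.ofCharsBase? (none = ValueError, excluded by Pre_, so .getD 0
-- is never the raising case on admitted inputs); '^' is PySem.Int.bxor; "1"*len(n) is List.replicate.
def fromLcomp (s : String) : Int :=
  let cs := s.toList
  if cs = [] then 0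
  else if cs.head? = some '1' then (PySem.Int.ofCharsBase? cs 2).getD 0
  else (PySem.Int.bxor ((PySem.Int.ofCharsBase? cs 2).getD 0)
          ((PySem.Int.ofCharsBase? (List.replicate cs.length '1') 2).getD 0)) * (-1)

-- inner 'for j in range(1, 17): if prefix in acHT: … break' — first matching length with its value
def acDeFind (acHT : List (String × Int)) (cs : List Char) (i : Nat) : Option (Nat × Int) :=
  (List.range' 1 16).findSome? (fun (j : Nat) =>
    match (PySem.Dict.mk acHT).get? (String.ofList (PySem.List.slice cs (some (i : Int)) (some ((i : Int) + (j : Int))))) with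
    | some v => some (j, v)
    | none => none)

-- the outer while loop; fuel = |ac_code| makes it total (i advances by ≥ 1 per appended pair).
-- When no prefix matches Python spins forever (excluded by Pre_); the port returns the list so far.
def acDeLoop (acHT : List (String × Int)) (cs : List Char) : Nat → Nat → List (Int × Int) → List (Int × Int)
  | 0, _, acc => acc.reverse
  | fuel + 1, i, acc =>
    if i < cs.length then
      match acDeFind acHT cs i with
      | some (j, val) =>
        let r : Int := val >>> 4                      -- Python val >> 4
        let a : Nat := (PySem.Int.band val 15).toNat  -- Python val & 0xF (result is in 0..15)
        acDeLoop acHT cs fuel (i + j + a)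
          ((r, fromLcomp (String.ofList (PySem.List.slice cs (some ((i : Int) + (j : Int))) (some ((i : Int) + (j : Int) + (a : Int)))))) :: acc)
      | none => acc.reverse
    else acc.reverse

def acDe (acHT : List (String × Int)) (ac_code : String) : List (Int × Int) :=
  acDeLoop acHT ac_code.toList ac_code.toList.length 0 []

-- ===== PORT B =====
-- prefix trie: a node carries the optional code value (Python's None key) and its children as an
-- explicit association structure (Python's per-node dict; one entry per character, order immaterial
-- to lookup) — a mutual pair instead of a nested inductive
mutual
inductive CTrie where
  | mk (val : Option Int) (kids : CKids)
inductive CKids where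
  | nil
  | cons (c : Char) (t : CTrie) (rest : CKids)
end

def CTrie.empty : CTrie := .mk none .nil

def CTrie.val : CTrie → Option Int
  | .mk w _ => w

-- node.get(c): none = absent child
def CKids.find? : CKids → Char → Option CTrie
  | .nil, _ => none
  | .cons d t rest, c => if d = c then some t else rest.find? c

def CTrie.childOpt : CTrie → Char → Option CTrie
  | .mk _ ks, c => ks.find? c

-- insert one code: node.setdefault(c, {}) along the path, then node.setdefault(None, v)
mutual
def CTrie.ins (t : CTrie) (cs : List Char) (v : Int) : CTrie :=
  match t, cs with
  | .mk w ks, [] => .mk (w.or (some v)) ks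
  | .mk w ks, c :: cs' => .mk w (CKids.insPath ks c cs' v)
termination_by (cs.length, 0)
def CKids.insPath (ks : CKids) (c : Char) (cs : List Char) (v : Int) : CKids :=
  match ks with
  | .nil => .cons c (CTrie.ins CTrie.empty cs v) .nil
  | .cons d t rest =>
    if d = c then .cons d (CTrie.ins t cs v) rest else .cons d t (CKids.insPath rest c cs v)
termination_by (cs.length, sizeOf ks + 1)
end
def bBuild (acHT : List (String × Int)) : CTrie :=
  acHT.foldl (fun t kv =>
    if kv.1.toList ≠ [] then CTrie.ins t kv.1.toList kv.2 else t) CTrie.empty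

-- inner descent: consume characters one at a time until the first node carrying a value
def bWalk (cs : List Char) (i : Nat) (t : CTrie) (j : Nat) : Option (Nat × Int) :=
  if _h : j < 16 ∧ i + j < cs.length then
    match t.childOpt cs[i + j]! with
    | none => none
    | some t' =>
      match t'.val with
      | some v => some (j + 1, v)
      | none => bWalk cs i t' (j + 1)
  else none
termination_by 16 - j
decreasing_by omega

def bLoop (t : CTrie) (cs : List Char) : Nat → Nat → List (Int × Int) → List (Int × Int)
  | 0, _, acc => acc.reverse
  | fuel + 1, i, acc =>
    if i < cs.length then
      match bWalk cs i t 0 with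
      | none => acc.reverse   -- no code matches: invalid input, stop (Python A spins; outside Pre_)
      | some (j, v) =>
        let r : Int := v >>> 4
        let a : Nat := (PySem.Int.band v 15).toNat
        bLoop t cs fuel (i + j + a)
          ((r, fromLcomp (String.ofList (PySem.List.slice cs (some ((i : Int) + (j : Int))) (some ((i : Int) + (j : Int) + (a : Int)))))) :: acc)
    else acc.reverse

def acDe_alt (acHT : List (String × Int)) (ac_code : String) : List (Int × Int) :=
  bLoop (bBuild acHT) ac_code.toList ac_code.toList.length 0 []

-- ===== PRECONDITION & SPEC =====
-- Pre_acDe is exactly the domain of A (the inputs on which it returns normally), stated as a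
-- declarative decodability predicate on the input: from every reached position the shortest matching
-- prefix of length 1..16 exists (otherwise A's while loop spins forever) and the following a lcomp
-- characters are empty or parse under int(.,2) (otherwise from_lcomp raises ValueError).  The ports
-- themselves agree on every input (the proof below does not need this hypothesis); Pre_ only
-- delimits where Python A has a value at all.
def pvStep (acHT : List (String × Int)) (rem : List Char) : Option (Nat × Int) :=
  (List.range' 1 16).findSome? (fun (j : Nat) =>
    match (PySem.Dict.mk acHT).get? (String.ofList (rem.take j)) with
    | some v => some (j, v)
    | none => none)

-- one budget unit per decoded pair; each pair consumes at least one character, so a budget of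
-- |cs| is always enough and the budget-exhausted case is only ever reached with the string consumed
def pvDecodesAux (acHT : List (String × Int)) (cs : List Char) : Nat → Nat → Bool
  | 0, i => decide (cs.length ≤ i)
  | k + 1, i =>
    if i < cs.length then
      match pvStep acHT (cs.drop i) with
      | none => false
      | some (j, v) =>
        (((cs.drop (i + j)).take ((PySem.Int.band v 15).toNat)).isEmpty ||
          (PySem.Int.ofCharsBase? ((cs.drop (i + j)).take ((PySem.Int.band v 15).toNat)) 2).isSome) &&
        pvDecodesAux acHT cs k (i + j + (PySem.Int.band v 15).toNat)
    else true

def pvDecodes (acHT : List (String × Int)) (cs : List Char) : Bool :=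
  pvDecodesAux acHT cs cs.length 0

def Pre_acDe (acHT : List (String × Int)) (ac_code : String) : Prop :=
  pvDecodes acHT ac_code.toList = true
instance (acHT : List (String × Int)) (ac_code : String) : Decidable (Pre_acDe acHT ac_code) := by
  unfold Pre_acDe; infer_instance

def pvWitness_acDe : (List (String × Int)) × String := ([("0", 5), ("1", 17)], "0110")

def Spec_acDe (acHT : List (String × Int)) (ac_code : String) (out : List (Int × Int)) : Prop := out = acDe_alt acHT ac_code
instance (acHT : List (String × Int)) (ac_code : String) (out : List (Int × Int)) : Decidable (Spec_acDe acHT ac_code out) := by unfold Spec_acDe; infer_instance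

-- ===== CLAIM (what is proved, stated in full; the proofs are below) =====
def Claim_equal_acDe : Prop := ∀ (acHT : List (String × Int)) (ac_code : String), Dom_acDe acHT ac_code → Pre_acDe acHT ac_code → Spec_acDe acHT ac_code (acDe acHT ac_code)

-- ===== LEMMAS AND PROOFS =====

-- node reached from t along path p (none once the descent leaves the trie)
def nodeAt? : CTrie → List Char → Option CTrie
  | t, [] => some t
  | t, c :: p =>
    match t.childOpt c with
    | none => none
    | some t' => nodeAt? t' p

-- the value A's dict lookup of path p must agree with
def pvPathVal (t : CTrie) (p : List Char) : Option Int := (nodeAt? t p).bind CTrie.val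

-- A's candidate at length j, phrased over the remainder of the bitstring
def pvF (acHT : List (String × Int)) (rem : List Char) (j : Nat) : Option (Nat × Int) :=
  match (PySem.Dict.mk acHT).get? (String.ofList (rem.take j)) with
  | some v => some (j, v)
  | none => none

theorem pathVal_cons (t : CTrie) (c : Char) (p : List Char) :
    pvPathVal t (c :: p) =
      match t.childOpt c with
      | none => none
      | some t' => pvPathVal t' p := by
  cases h : t.childOpt c <;> simp [pvPathVal, nodeAt?, h]

theorem nodeAt?_append (t : CTrie) (p q : List Char) :
    nodeAt? t (p ++ q) = (nodeAt? t p).bind (fun u => nodeAt? u q) := by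
  induction p generalizing t with
  | nil => simp [nodeAt?]
  | cons c p ih =>
    rw [List.cons_append]
    cases h : t.childOpt c with
    | none => simp [nodeAt?, h]
    | some t' => simp [nodeAt?, h, ih t']

theorem childOpt_empty (c : Char) : CTrie.empty.childOpt c = none := rfl

theorem pathVal_empty (p : List Char) : pvPathVal CTrie.empty p = none := by
  cases p with
  | nil => rfl
  | cons c p => rw [pathVal_cons, childOpt_empty]

theorem val_ins_cons (t : CTrie) (c : Char) (cs : List Char) (v : Int) :
    (t.ins (c :: cs) v).val = t.val := by
  cases t; simp [CTrie.ins, CTrie.val]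

theorem val_ins_nil (t : CTrie) (v : Int) :
    (t.ins [] v).val = t.val.or (some v) := by
  cases t; simp [CTrie.ins, CTrie.val]

theorem childOpt_ins_nil (t : CTrie) (v : Int) (c : Char) :
    (t.ins [] v).childOpt c = t.childOpt c := by
  cases t; simp [CTrie.ins, CTrie.childOpt]

theorem insPath_find? (ks : CKids) (c e : Char) (cs : List Char) (v : Int) :
    (CKids.insPath ks c cs v).find? e =
      if c = e then some (CTrie.ins ((ks.find? c).getD CTrie.empty) cs v) else ks.find? e := by
  cases ks with
  | nil =>
    rw [CKids.insPath]
    by_cases h : c = e <;> simp [CKids.find?, h]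
  | cons d t rest =>
    have ih := insPath_find? rest c e cs v
    rw [CKids.insPath]
    by_cases hdc : d = c
    · subst hdc
      by_cases hde : d = e <;> simp [CKids.find?, hde]
    · rw [if_neg hdc]
      by_cases hde : d = e
      · subst hde
        rw [if_neg (fun h => hdc h.symm)]
        simp [CKids.find?]
      · simp [CKids.find?, hde, hdc, ih]
termination_by sizeOf ks

theorem childOpt_ins_cons (t : CTrie) (c' : Char) (cs' : List Char) (v : Int) (c : Char) :
    (t.ins (c' :: cs') v).childOpt c =
      if c' = c then some (CTrie.ins ((t.childOpt c').getD CTrie.empty) cs' v)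
      else t.childOpt c := by
  cases t with
  | mk w ks =>
    simp only [CTrie.ins, CTrie.childOpt]
    exact insPath_find? ks c' c cs' v

theorem pathVal_ins (k : List Char) : ∀ (p : List Char) (t : CTrie) (v : Int),
    pvPathVal (t.ins k v) p =
      if k = p then (pvPathVal t p).or (some v) else pvPathVal t p := by
  induction k with
  | nil =>
    intro p t v
    cases p with
    | nil => simp [pvPathVal, nodeAt?, val_ins_nil]
    | cons c p' =>
      rw [pathVal_cons, pathVal_cons, childOpt_ins_nil]
      simp
  | cons c' k' ih =>
    intro p t v
    cases p with
    | nil => simp [pvPathVal, nodeAt?, val_ins_cons]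
    | cons c p' =>
      rw [pathVal_cons, pathVal_cons, childOpt_ins_cons]
      by_cases h : c' = c
      · subst h
        rw [if_pos rfl]
        cases hch : t.childOpt c' with
        | none =>
          simp only [Option.getD_none, ih p' CTrie.empty v, pathVal_empty]
          by_cases hk : k' = p' <;> simp [hk]
        | some t0 =>
          simp only [Option.getD_some, ih p' t0 v]
          by_cases hk : k' = p' <;> simp [hk]
      · rw [if_neg h]
        have : ¬ (c' :: k' = c :: p') := by simp [h]
        rw [if_neg this]

-- after the whole build, the value at a nonempty path is the dict's first-match lookup
theorem pathVal_build_aux (p : List Char) (hp : p ≠ []) :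
    ∀ (l : List (String × Int)) (t : CTrie),
      pvPathVal (l.foldl (fun t kv =>
        if kv.1.toList ≠ [] then CTrie.ins t kv.1.toList kv.2 else t) t) p
      = (pvPathVal t p).or ((PySem.Dict.mk l).get? (String.ofList p)) := by
  intro l
  induction l with
  | nil => intro t; simp [PySem.Dict.get?]
  | cons kv rest ih =>
    intro t
    rw [List.foldl_cons, ih, PySem.Dict.get?_mk_cons]
    split_ifs with hne hkey hkey
    · -- nonempty key equal to p
      have hlist : kv.1.toList = p := by
        have h := beq_iff_eq.mp hkey
        simpa [String.toList_ofList] using congrArg String.toList h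
      rw [pathVal_ins kv.1.toList p t kv.2, if_pos hlist]
      simp
    · -- nonempty key, different from p
      have hlist : kv.1.toList ≠ p := by
        intro h
        exact hkey (beq_iff_eq.mpr (by rw [← h, String.ofList_toList]))
      rw [pathVal_ins kv.1.toList p t kv.2, if_neg hlist]
    · -- a skipped (empty) key cannot equal the nonempty path
      exfalso
      have hlist : kv.1.toList = p := by
        have h := beq_iff_eq.mp hkey
        simpa [String.toList_ofList] using congrArg String.toList h
      refine hp ?_
      rw [← hlist]
      exact not_not.mp (by simpa using hne)
    · rfl

theorem pathVal_build (acHT : List (String × Int)) (p : List Char) (hp : p ≠ []) :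
    pvPathVal (bBuild acHT) p = (PySem.Dict.mk acHT).get? (String.ofList p) := by
  have := pathVal_build_aux p hp acHT CTrie.empty
  simpa [bBuild, pathVal_empty] using this

-- A's inner scan is findSome? of pvF over the candidate lengths 1..16
theorem acDeFind_eq_F (acHT : List (String × Int)) (cs : List Char) (i : Nat) :
    acDeFind acHT cs i = (List.range' 1 16).findSome? (pvF acHT (cs.drop i)) := by
  unfold acDeFind
  refine congrArg (fun g => List.findSome? g (List.range' 1 16)) (funext fun j => ?_)
  rw [show ((i : Int) + (j : Int)) = ((i + j : Nat) : Int) by push_cast; ring]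
  rw [show PySem.List.slice cs (some (i : Int)) (some ((i + j : Nat) : Int)) =
    (cs.drop i).take j from by
      have := PySem.List.slice_natCast_add cs i j
      rw [← this]; norm_num]
  rfl

-- the trie descent from depth j computes A's first match among lengths j+1..16
theorem walk_eq_from (acHT : List (String × Int)) (cs : List Char) (i : Nat)
    (hi : i < cs.length) :
    ∀ (n j : Nat) (t : CTrie), j + n = 16 →
      nodeAt? (bBuild acHT) ((cs.drop i).take j) = some t →
      (∀ m, 1 ≤ m → m ≤ j → pvPathVal (bBuild acHT) ((cs.drop i).take m) = none) →
      bWalk cs i t j = (List.range' (j+1) n).findSome? (pvF acHT (cs.drop i)) := by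
  intro n
  induction n with
  | zero =>
    intro j t hn _ _
    have hj : j = 16 := by omega
    subst hj
    rw [bWalk]
    simp
  | succ n ih =>
    intro j t hn hat hprev
    have hrem1 : 1 ≤ (cs.drop i).length := by simp; omega
    have htakene : ∀ (m : Nat), 1 ≤ m → (cs.drop i).take m ≠ [] := by
      intro m hm hnil
      have h := congrArg List.length hnil
      simp [List.length_take] at h
      omega
    have hranne : ∀ j' ∈ List.range' (j+1) (n+1), j + 1 ≤ j' := by
      intro j' hj'
      have := (List.mem_range'_1.mp hj').1
      omega
    by_cases hj : i + j < cs.length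
    · have hjr : j < (cs.drop i).length := by simp; omega
      have hget : cs[i+j]! = (cs.drop i)[j] := by
        rw [getElem!_pos cs (i+j) hj]
        exact (List.getElem_drop ..).symm
      have htake : (cs.drop i).take (j+1) = (cs.drop i).take j ++ [(cs.drop i)[j]] := by
        rw [List.take_add_one, List.getElem?_eq_getElem hjr]
        rfl
      have hnode : nodeAt? (bBuild acHT) ((cs.drop i).take (j+1)) =
          t.childOpt (cs.drop i)[j] := by
        rw [htake, nodeAt?_append, hat]
        show nodeAt? t [(cs.drop i)[j]] = _
        unfold nodeAt?
        cases t.childOpt (cs.drop i)[j] <;> rfl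
      rw [bWalk, dif_pos ⟨by omega, hj⟩, hget]
      cases hC : t.childOpt (cs.drop i)[j] with
      | none =>
        -- dead end: no key extends this path, so every longer candidate misses too
        symm
        rw [List.findSome?_eq_none_iff]
        intro j' hj'
        have hle : j + 1 ≤ j' := hranne j' hj'
        have hdecomp : (cs.drop i).take j' =
            (cs.drop i).take (j+1) ++ ((cs.drop i).take j').drop (j+1) := by
          conv_lhs => rw [← List.take_append_drop (j+1) ((cs.drop i).take j')]
          rw [List.take_take, min_eq_left hle]
        unfold pvF
        rw [← pathVal_build acHT _ (htakene j' (by omega))]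
        rw [pvPathVal, hdecomp, nodeAt?_append, hnode, hC]
        rfl
      | some t' =>
        have hat' : nodeAt? (bBuild acHT) ((cs.drop i).take (j+1)) = some t' := by
          rw [hnode, hC]
        have hgetval : (PySem.Dict.mk acHT).get? (String.ofList ((cs.drop i).take (j+1))) =
            t'.val := by
          rw [← pathVal_build acHT _ (htakene (j+1) (by omega)), pvPathVal, hat']
          rfl
        rw [List.range'_succ, List.findSome?_cons]
        cases hV : t'.val with
        | some v => simp only [pvF, hgetval, hV]
        | none =>
          simp only [pvF, hgetval, hV]
          exact ih (j+1) t' (by omega) hat'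
            (by
              intro m hm1 hm2
              rcases Nat.lt_or_ge m (j+1) with hlt | hge
              · exact hprev m hm1 (by omega)
              · have hm : m = j + 1 := by omega
                rw [hm, pathVal_build acHT _ (htakene (j+1) (by omega)), hgetval, hV])
    · -- the string is exhausted: every longer candidate is the already-missed full remainder
      rw [bWalk, dif_neg (by omega)]
      symm
      rw [List.findSome?_eq_none_iff]
      intro j' hj'
      have hlen : (cs.drop i).length ≤ j := by simp; omega
      have hfull : (cs.drop i).take j' = cs.drop i :=
        List.take_of_length_le (by have := hranne j' hj'; omega)
      have hself : (cs.drop i).take ((cs.drop i).length) = cs.drop i := List.take_length ..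
      unfold pvF
      rw [← pathVal_build acHT _ (by rw [hfull]; intro h; rw [h] at hrem1; simp at hrem1)]
      rw [show (cs.drop i).take j' = (cs.drop i).take ((cs.drop i).length) from by
        rw [hfull, hself]]
      rw [hprev ((cs.drop i).length) hrem1 hlen]

-- the two finders agree at every position
theorem finder_eq (acHT : List (String × Int)) (cs : List Char) (i : Nat)
    (hi : i < cs.length) :
    bWalk cs i (bBuild acHT) 0 = acDeFind acHT cs i := by
  rw [acDeFind_eq_F]
  exact walk_eq_from acHT cs i hi 16 0 (bBuild acHT) rfl
    (by rw [List.take_zero]; rfl) (fun m hm1 hm2 => by omega)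

-- loop equivalence: with equal finders the two loops are the same recursion
theorem loop_eq (acHT : List (String × Int)) (cs : List Char) :
    ∀ (fuel i : Nat) (acc : List (Int × Int)),
      acDeLoop acHT cs fuel i acc = bLoop (bBuild acHT) cs fuel i acc := by
  intro fuel
  induction fuel with
  | zero => intro i acc; rfl
  | succ fuel ih =>
    intro i acc
    by_cases hi : i < cs.length
    · show acDeLoop acHT cs (fuel + 1) i acc = bLoop (bBuild acHT) cs (fuel + 1) i acc
      rw [acDeLoop, bLoop, if_pos hi, if_pos hi, finder_eq acHT cs i hi]
      cases acDeFind acHT cs i with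
      | none => rfl
      | some jv => exact ih _ _
    · show acDeLoop acHT cs (fuel + 1) i acc = bLoop (bBuild acHT) cs (fuel + 1) i acc
      rw [acDeLoop, bLoop, if_neg hi, if_neg hi]

-- ===== VERDICT (by name: the statement is the Claim_ definition above) =====
theorem acDe_spec : Claim_equal_acDe := by
  intro acHT ac_code _ _
  unfold Spec_acDe acDe acDe_alt
  exact loop_eq acHT ac_code.toList _ _ _
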